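-- pv_equiv track=rewrite | github.com/tdworowy/PythonPlayground | Playground/Exercises/exer37_shoes.py | count_earnings
-- ===== SOURCE A (Python) =====
-- from collections import Counter
--
-- def count_earnings(shoes_sizes: list, demands: list):
--     shoes_sizes = Counter(shoes_sizes)
--     indexes = []
--     earnings = 0
--     for size in shoes_sizes:
--         shou_count = shoes_sizes[size]
--         for count in range(shoes_sizes[size]):
--             for i, demand in enumerate(demands):
--                 if size == demand[0] and i not in indexes and shou_count != 0:
--                     indexes.append(i)
--                     earnings += demand[1]
--                     shou_count -= 1
--     return earnings
-- ===== SOURCE B (Python) =====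
-- from collections import Counter
--
-- def count_earnings(shoes_sizes: list, demands: list):
--     remaining = Counter(shoes_sizes)
--     earnings = 0
--     for size, price in demands:
--         if remaining[size] > 0:
--             remaining[size] -= 1
--             earnings += price
--     return earnings
-- ===== Notes on version B (the rewrite author's own statement) =====
-- stated objective: faster
-- what changed: Replaced A's triple nested loop (Counter keys x range(count) x full scans of demands with a linear 'i not in indexes' membership test) by a single pass over demands that decrements a per-size Counter, removing the indexes list entirely.
import Mathlib
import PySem

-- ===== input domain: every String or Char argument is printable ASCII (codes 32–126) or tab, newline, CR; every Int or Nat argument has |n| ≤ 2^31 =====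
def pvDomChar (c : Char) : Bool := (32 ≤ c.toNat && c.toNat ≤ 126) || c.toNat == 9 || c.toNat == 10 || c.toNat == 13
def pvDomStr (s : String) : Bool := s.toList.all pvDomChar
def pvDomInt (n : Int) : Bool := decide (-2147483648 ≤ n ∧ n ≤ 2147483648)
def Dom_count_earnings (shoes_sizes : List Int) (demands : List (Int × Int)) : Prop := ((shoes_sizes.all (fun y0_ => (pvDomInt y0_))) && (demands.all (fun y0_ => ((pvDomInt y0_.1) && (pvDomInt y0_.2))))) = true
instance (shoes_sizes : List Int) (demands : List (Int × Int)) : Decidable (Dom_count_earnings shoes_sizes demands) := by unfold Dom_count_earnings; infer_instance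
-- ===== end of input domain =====

-- B replaces A's triple nested loop (keys × range(count) × demands with an `indexes` seen-list)
-- by a single pass over demands that decrements a per-size counter: O(n+m) instead of A's
-- roughly O(#sizes · shoe-count · m) with a linear `i not in indexes` test inside.

-- ===== PORT A =====
-- inner loop: `for i, demand in enumerate(demands): ...`  (state: indexes, earnings, shou_count)
def ceInner (size : Int) (demands : List (Int × Int)) (i : Nat)
    (st : List Int × Int × Int) : List Int × Int × Int :=
  match demands with
  | [] => st
  | d :: rest =>
      if size = d.1 ∧ ¬ ((i : Int) ∈ st.1) ∧ st.2.2 ≠ 0 then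
        ceInner size rest (i + 1) (st.1 ++ [(i : Int)], st.2.1 + d.2, st.2.2 - 1)
      else ceInner size rest (i + 1) st

def count_earnings (shoes_sizes : List Int) (demands : List (Int × Int)) : Int :=
  -- shoes_sizes = Counter(shoes_sizes)
  let cnt := PySem.Dict.counter shoes_sizes
  -- for size in shoes_sizes: shou_count = shoes_sizes[size]; for count in range(shoes_sizes[size]): inner loop
  let res := cnt.keys.foldl
    (fun (st : List Int × Int) size =>
      let shou := cnt.getD size 0
      let r := (PySem.List.pyRange 0 (cnt.getD size 0) 1).foldl
        (fun st2 _ => ceInner size demands 0 st2) (st.1, st.2, shou)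
      (r.1, r.2.1))
    ([], 0)
  res.2

-- ===== PORT B =====
def count_earnings_alt (shoes_sizes : List Int) (demands : List (Int × Int)) : Int :=
  let res := demands.foldl
    (fun (st : PySem.Dict Int Int × Int) dp =>
      let c := st.1.getD dp.1 0
      if c > 0 then (st.1.insert dp.1 (c - 1), st.2 + dp.2) else st)
    (PySem.Dict.counter shoes_sizes, 0)
  res.2

-- ===== PRECONDITION & SPEC =====
def Spec_count_earnings (shoes_sizes : List Int) (demands : List (Int × Int)) (out : Int) : Prop := out = count_earnings_alt shoes_sizes demands
instance (shoes_sizes : List Int) (demands : List (Int × Int)) (out : Int) : Decidable (Spec_count_earnings shoes_sizes demands out) := by unfold Spec_count_earnings; infer_instance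

-- ===== CLAIM (what is proved, stated in full; the proofs are below) =====
def Claim_equal_count_earnings : Prop := ∀ (shoes_sizes : List Int) (demands : List (Int × Int)), Dom_count_earnings shoes_sizes demands → Spec_count_earnings shoes_sizes demands (count_earnings shoes_sizes demands)

-- ===== LEMMAS AND PROOFS =====

-- per-size earnings with budget b over the demand list (common abstraction of both sides)
def gE (s b : Int) : List (Int × Int) → Int
  | [] => 0
  | d :: rest => if s = d.1 ∧ b ≠ 0 then d.2 + gE s (b - 1) rest else gE s b rest

-- one full inner pass, specified: (appended indices, earned, leftover budget)
def gPass (s : Int) (i0 : Nat) (b : Int) : List (Int × Int) → List Int × Int × Int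
  | [] => ([], 0, b)
  | d :: rest =>
      if s = d.1 ∧ b ≠ 0 then
        let t := gPass s (i0 + 1) (b - 1) rest
        ((i0 : Int) :: t.1, d.2 + t.2.1, t.2.2)
      else gPass s (i0 + 1) b rest

theorem gE_zero (s : Int) (l : List (Int × Int)) : gE s 0 l = 0 := by
  induction l with
  | nil => rfl
  | cons d rest ih => simp [gE, ih]

theorem gPass_zero (s : Int) (l : List (Int × Int)) : ∀ i0, gPass s i0 0 l = ([], 0, 0) := by
  induction l with
  | nil => intro i0; rfl
  | cons d rest ih => intro i0; simp [gPass, ih]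

theorem gPass_E (s : Int) (i0 : Nat) (b : Int) (l : List (Int × Int)) :
    (gPass s i0 b l).2.1 = gE s b l := by
  induction l generalizing i0 b with
  | nil => rfl
  | cons d rest ih =>
      obtain ⟨d1, d2⟩ := d
      by_cases h : s = d1 ∧ b ≠ 0
      · obtain ⟨hs, hb⟩ := h
        subst hs
        simp [gPass, gE, hb, ih]
      · simp [gPass, gE, h, ih]

theorem gPass_idx_mem (s : Int) (i0 : Nat) (b : Int) (l : List (Int × Int)) :
    ∀ x ∈ (gPass s i0 b l).1, ∃ j, ∃ h : j < l.length, x = ((i0 + j : Nat) : Int) ∧ (l[j]).1 = s := by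
  induction l generalizing i0 b with
  | nil => intro x hx; simp [gPass] at hx
  | cons d rest ih =>
      obtain ⟨d1, d2⟩ := d
      intro x hx
      by_cases h : s = d1 ∧ b ≠ 0
      · obtain ⟨hs, hb⟩ := h
        subst hs
        rw [gPass, if_pos ⟨rfl, hb⟩] at hx
        rcases List.mem_cons.mp hx with hx | hx
        · exact ⟨0, by simp, by simpa using hx, by simp⟩
        · rcases ih (i0 + 1) (b - 1) x hx with ⟨j, hj, hx', hs'⟩
          exact ⟨j + 1, by simpa using hj, by rw [hx']; congr 1; omega, by simpa using hs'⟩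
      · rw [gPass, if_neg h] at hx
        rcases ih (i0 + 1) b x hx with ⟨j, hj, hx', hs'⟩
        exact ⟨j + 1, by simpa using hj, by rw [hx']; congr 1; omega, by simpa using hs'⟩

theorem gPass_complete (s : Int) (i0 : Nat) (b : Int) (l : List (Int × Int)) (hb : 0 ≤ b) :
    (gPass s i0 b l).2.2 = 0 ∨
      ∀ j, ∀ h : j < l.length, (l[j]).1 = s → ((i0 + j : Nat) : Int) ∈ (gPass s i0 b l).1 := by
  induction l generalizing i0 b with
  | nil => right; intro j hj; simp at hj
  | cons d rest ih =>
      obtain ⟨d1, d2⟩ := d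
      by_cases h : s = d1 ∧ b ≠ 0
      · obtain ⟨hs, hbne⟩ := h
        subst hs
        rw [gPass, if_pos ⟨rfl, hbne⟩]
        rcases ih (i0 + 1) (b - 1) (by omega) with h0 | hall
        · left; exact h0
        · right
          intro j hj hs'
          cases j with
          | zero => simp
          | succ k =>
              apply List.mem_cons_of_mem
              have := hall k (by simpa using hj) (by simpa using hs')
              have he : ((i0 + (k + 1) : Nat) : Int) = ((i0 + 1 + k : Nat) : Int) := by congr 1; omega
              rw [he]; exact this
      · rw [gPass, if_neg h]
        by_cases hb0 : b = 0
        · left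
          subst hb0
          rw [gPass_zero]
        · have hds : d1 ≠ s := fun he => h ⟨he.symm, hb0⟩
          rcases ih (i0 + 1) b hb with h0 | hall
          · left; exact h0
          · right
            intro j hj hs'
            cases j with
            | zero => exact absurd (by simpa using hs') hds
            | succ k =>
                have := hall k (by simpa using hj) (by simpa using hs')
                have he : ((i0 + (k + 1) : Nat) : Int) = ((i0 + 1 + k : Nat) : Int) := by congr 1; omega
                rw [he]; exact this

-- simulation: one inner pass equals gPass, provided no matching index is already taken
theorem ceInner_eq_gPass (s : Int) (l : List (Int × Int)) (i0 : Nat)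
    (idx : List Int) (e b : Int)
    (H : ∀ j, ∀ h : j < l.length, (l[j]).1 = s → ((i0 + j : Nat) : Int) ∉ idx) :
    ceInner s l i0 (idx, e, b) =
      (idx ++ (gPass s i0 b l).1, e + (gPass s i0 b l).2.1, (gPass s i0 b l).2.2) := by
  induction l generalizing i0 idx e b with
  | nil => simp [ceInner, gPass]
  | cons d rest ih =>
      obtain ⟨d1, d2⟩ := d
      by_cases h : s = d1 ∧ b ≠ 0
      · obtain ⟨hs, hb⟩ := h
        subst hs
        have hnot : ((i0 : Int)) ∉ idx := by simpa using H 0 (by simp) (by simp)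
        have hg : gPass s i0 b ((s, d2) :: rest) =
            ((i0 : Int) :: (gPass s (i0 + 1) (b - 1) rest).1,
              d2 + (gPass s (i0 + 1) (b - 1) rest).2.1, (gPass s (i0 + 1) (b - 1) rest).2.2) := by
          rw [gPass, if_pos ⟨rfl, hb⟩]
        have H' : ∀ j, ∀ hh : j < rest.length, (rest[j]).1 = s →
            (((i0 + 1) + j : Nat) : Int) ∉ idx ++ [(i0 : Int)] := by
          intro j hh hs'
          have h1 : ((i0 + (j + 1) : Nat) : Int) ∉ idx := H (j + 1) (by simpa using hh) (by simpa using hs')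
          intro hmem
          rcases List.mem_append.mp hmem with hm | hm
          · apply h1
            have he : ((i0 + (j + 1) : Nat) : Int) = ((i0 + 1 + j : Nat) : Int) := by congr 1; omega
            rw [he]; exact hm
          · simp at hm; omega
        rw [ceInner, if_pos ⟨rfl, hnot, hb⟩, ih (i0 + 1) (idx ++ [(i0 : Int)]) (e + d2) (b - 1) H', hg]
        refine Prod.ext ?_ (Prod.ext ?_ ?_)
        · simp
        · simp; ring
        · rfl
      · have hcond : ¬ (s = d1 ∧ ¬ ((i0 : Int) ∈ idx) ∧ b ≠ 0) := by
          rintro ⟨h1, _, h3⟩; exact h ⟨h1, h3⟩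
        rw [ceInner, if_neg hcond, gPass, if_neg h]
        exact ih (i0 + 1) idx e b (fun j hh hs' => by
          have := H (j + 1) (by simpa using hh) (by simpa using hs')
          have he : ((i0 + 1 + j : Nat) : Int) = ((i0 + (j + 1) : Nat) : Int) := by congr 1; omega
          rw [he]; exact this)

-- a pass that can take nothing is the identity
theorem ceInner_id (s : Int) (l : List (Int × Int)) (i0 : Nat) (idx : List Int) (e b : Int)
    (H : b = 0 ∨ ∀ j, ∀ h : j < l.length, (l[j]).1 = s → ((i0 + j : Nat) : Int) ∈ idx) :
    ceInner s l i0 (idx, e, b) = (idx, e, b) := by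
  induction l generalizing i0 with
  | nil => rfl
  | cons d rest ih =>
      have hcond : ¬ (s = d.1 ∧ ¬ ((i0 : Int) ∈ idx) ∧ b ≠ 0) := by
        rintro ⟨hs, hni, hb⟩
        rcases H with h0 | hall
        · exact hb h0
        · exact hni (by simpa using hall 0 (by simp) (by simp [hs.symm]))
      rw [ceInner, if_neg hcond]
      apply ih
      rcases H with h0 | hall
      · exact Or.inl h0
      · right
        intro j hj hs'
        have := hall (j + 1) (by simpa using hj) (by simpa using hs')
        have he : ((i0 + 1 + j : Nat) : Int) = ((i0 + (j + 1) : Nat) : Int) := by congr 1; omega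
        rw [he]; exact this

theorem foldl_const_fix {α β : Type} (f : α → α) (st : α) (l : List β) (h : f st = st) :
    l.foldl (fun st _ => f st) st = st := by
  induction l with
  | nil => rfl
  | cons x r ih => simp [List.foldl, h, ih]

-- the middle loop (`for count in range(c)`) run on a fresh size computes one gPass
theorem middle_loop (s : Int) (demands : List (Int × Int)) (idx : List Int) (e c : Int)
    (hc : 0 ≤ c)
    (H : ∀ j, ∀ h : j < demands.length, (demands[j]).1 = s → ((j : Nat) : Int) ∉ idx) :
    (PySem.List.pyRange 0 c 1).foldl (fun st2 _ => ceInner s demands 0 st2) (idx, e, c) =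
      (idx ++ (gPass s 0 c demands).1, e + gE s c demands, (gPass s 0 c demands).2.2) := by
  rcases eq_or_lt_of_le hc with hc0 | hcpos
  · rw [PySem.List.pyRange_one_eq_nil (by omega), ← hc0, gPass_zero, gE_zero]
    simp
  · rw [PySem.List.pyRange_one_cons (by omega)]
    simp only [List.foldl_cons]
    rw [ceInner_eq_gPass s demands 0 idx e c (by simpa using H)]
    rw [foldl_const_fix]
    · rw [gPass_E]
    · apply ceInner_id
      rcases gPass_complete s 0 c demands hc with h0 | hall
      · exact Or.inl h0
      · right
        intro j hj hs'
        exact List.mem_append_right _ (by simpa using hall j hj hs')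

-- sum over a Nodup list with one distinguished element
theorem sum_map_distinguished (sz p : Int) (F G : Int → Int) :
    ∀ (l : List Int), l.Nodup → sz ∈ l → F sz = p + G sz → (∀ s ∈ l, s ≠ sz → F s = G s) →
    (l.map F).sum = p + (l.map G).sum := by
  intro l
  induction l with
  | nil => intro _ h; simp at h
  | cons a r ih =>
      intro hnd hmem hF hFG
      rcases List.mem_cons.mp hmem with rfl | hmem'
      · have : ∀ s ∈ r, F s = G s := by
          intro s hs
          exact hFG s (List.mem_cons_of_mem _ hs) (fun he => (List.nodup_cons.mp hnd).1 (he ▸ hs))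
        simp only [List.map_cons, List.sum_cons, hF]
        have : r.map F = r.map G := List.map_congr_left this
        rw [this]; ring
      · have ha : a ≠ sz := fun he => (List.nodup_cons.mp hnd).1 (he ▸ hmem')
        simp only [List.map_cons, List.sum_cons]
        rw [hFG a (List.mem_cons_self) ha,
          ih (List.nodup_cons.mp hnd).2 hmem' hF (fun s hs => hFG s (List.mem_cons_of_mem _ hs))]
        ring

-- B's fold decomposes into a per-key sum of gE
theorem alt_fold_eq_sum (demands : List (Int × Int)) :
    ∀ (d : PySem.Dict Int Int) (e : Int), d.keys.Nodup → (∀ s, 0 ≤ d.getD s 0) →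
    (demands.foldl
      (fun (st : PySem.Dict Int Int × Int) dp =>
        if st.1.getD dp.1 0 > 0 then (st.1.insert dp.1 (st.1.getD dp.1 0 - 1), st.2 + dp.2) else st)
      (d, e)).2 = e + (d.keys.map (fun s => gE s (d.getD s 0) demands)).sum := by
  induction demands with
  | nil =>
      intro d e _ _
      simp [gE]
  | cons dp rest ih =>
      obtain ⟨sz, p⟩ := dp
      intro d e hnd hpos
      by_cases hc : d.getD sz 0 > 0
      · have hmem : sz ∈ d.keys := by
          by_contra hno
          have : d.contains sz = false := by
            rcases Bool.eq_false_or_eq_true (d.contains sz) with h | h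
            · exact absurd ((PySem.Dict.contains_iff_mem_keys _ _).mp h) hno
            · exact h
          rw [PySem.Dict.getD_of_not_contains _ _ this] at hc
          omega
        have hkeys : (d.insert sz (d.getD sz 0 - 1)).keys = d.keys :=
          PySem.Dict.keys_insert_of_contains _ _ ((PySem.Dict.contains_iff_mem_keys _ _).mpr hmem)
        simp only [List.foldl_cons, if_pos hc]
        rw [ih (d.insert sz (d.getD sz 0 - 1)) (e + p) (by rw [hkeys]; exact hnd)
            (by
              intro s
              rw [PySem.Dict.getD_insert _ _ _ _ _]
              split_ifs with h
              · omega
              · exact hpos s)]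
        rw [hkeys]
        rw [sum_map_distinguished sz p
            (fun s => gE s (d.getD s 0) ((sz, p) :: rest))
            (fun s => gE s ((d.insert sz (d.getD sz 0 - 1)).getD s 0) rest)
            d.keys hnd hmem ?_ ?_]
        · ring
        · show gE sz (d.getD sz 0) ((sz, p) :: rest) = p + gE sz ((d.insert sz (d.getD sz 0 - 1)).getD sz 0) rest
          simp only [gE]
          rw [if_pos ⟨trivial, by omega⟩, PySem.Dict.getD_insert_self]
        · intro s _ hne
          show gE s (d.getD s 0) ((sz, p) :: rest) = gE s ((d.insert sz (d.getD sz 0 - 1)).getD s 0) rest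
          simp only [gE]
          rw [if_neg (by rintro ⟨h1, _⟩; exact hne h1),
            PySem.Dict.getD_insert_of_ne _ _ _ hne]
      · have hc0 : d.getD sz 0 = 0 := le_antisymm (by omega) (hpos sz)
        simp only [List.foldl_cons, if_neg hc]
        rw [ih d e hnd hpos]
        congr 1
        apply congrArg
        apply List.map_congr_left
        intro s _
        by_cases hse : s = sz
        · subst hse
          simp only [gE]
          rw [if_neg (by rintro ⟨_, h2⟩; exact h2 hc0)]
        · simp only [gE]
          rw [if_neg (by rintro ⟨h1, _⟩; exact hse h1)]

-- A's outer fold over the counter keys accumulates the same per-key sum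
theorem outer_fold_eq_sum (demands : List (Int × Int)) (d : PySem.Dict Int Int)
    (hpos : ∀ s, 0 ≤ d.getD s 0) :
    ∀ (ks : List Int) (idx : List Int) (e : Int), ks.Nodup →
    (∀ x ∈ idx, ∃ j, ∃ h : j < demands.length, x = ((j : Nat) : Int) ∧ (demands[j]).1 ∉ ks) →
    (ks.foldl
      (fun (st : List Int × Int) size =>
        (((PySem.List.pyRange 0 (d.getD size 0) 1).foldl
          (fun st2 _ => ceInner size demands 0 st2) (st.1, st.2, d.getD size 0)).1,
         ((PySem.List.pyRange 0 (d.getD size 0) 1).foldl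
          (fun st2 _ => ceInner size demands 0 st2) (st.1, st.2, d.getD size 0)).2.1)) (idx, e)).2
      = e + (ks.map (fun s => gE s (d.getD s 0) demands)).sum := by
  intro ks
  induction ks with
  | nil => intro idx e _ _; simp
  | cons s ks' ih =>
      intro idx e hnd hinv
      have H : ∀ j, ∀ h : j < demands.length, (demands[j]).1 = s → ((j : Nat) : Int) ∉ idx := by
        intro j hj hs hmem
        rcases hinv _ hmem with ⟨j', hj', hx, hout⟩
        have : j = j' := by exact_mod_cast hx
        subst this
        exact hout (by rw [hs]; exact List.mem_cons_self)
      simp only [List.foldl_cons]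
      rw [middle_loop s demands idx e (d.getD s 0) (hpos s) H]
      have hinv' : ∀ x ∈ idx ++ (gPass s 0 (d.getD s 0) demands).1,
          ∃ j, ∃ h : j < demands.length, x = ((j : Nat) : Int) ∧ (demands[j]).1 ∉ ks' := by
        intro x hx
        rcases List.mem_append.mp hx with hm | hm
        · rcases hinv x hm with ⟨j, hj, hx', hout⟩
          exact ⟨j, hj, hx', fun hin => hout (List.mem_cons_of_mem _ hin)⟩
        · rcases gPass_idx_mem s 0 (d.getD s 0) demands x hm with ⟨j, hj, hx', hs'⟩
          refine ⟨j, hj, by simpa using hx', ?_⟩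
          rw [hs']
          exact (List.nodup_cons.mp hnd).1
      rw [ih (idx ++ (gPass s 0 (d.getD s 0) demands).1) (e + gE s (d.getD s 0) demands)
          (List.nodup_cons.mp hnd).2 hinv']
      simp only [List.map_cons, List.sum_cons]
      ring

-- ===== VERDICT (by name: the statement is the Claim_ definition above) =====
theorem count_earnings_spec : Claim_equal_count_earnings := by
  intro shoes_sizes demands _
  have hpos : ∀ s, 0 ≤ (PySem.Dict.counter shoes_sizes).getD s 0 := by
    intro s
    rw [PySem.Dict.getD_counter]
    positivity
  simp only [Spec_count_earnings, count_earnings, count_earnings_alt]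
  rw [alt_fold_eq_sum demands (PySem.Dict.counter shoes_sizes) 0
      (PySem.Dict.nodup_keys_counter shoes_sizes) hpos]
  rw [outer_fold_eq_sum demands (PySem.Dict.counter shoes_sizes) hpos
      (PySem.Dict.counter shoes_sizes).keys [] 0 (PySem.Dict.nodup_keys_counter shoes_sizes) (by simp)]
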